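-- pv_equiv track=rewrite | github.com/Pipicano25/GeoMapperBot | import webbrowser multiple.py | evaluar_sugerencia
-- ===== SOURCE A (Python) =====
-- def evaluar_sugerencia(direccion_busqueda, texto_sugerencia):
--     """
--     Evalúa qué tan relevante es una sugerencia
--     Retorna un puntaje: mayor puntaje = mejor coincidencia
--     """
--     puntaje = 0
--     direccion = direccion_busqueda.lower().replace('#', ' ').replace('-', ' ')
--     sugerencia = texto_sugerencia.lower()
--
--     # Separar en palabras
--     palabras_direccion = set(direccion.split())
--     palabras_sugerencia = set(sugerencia.split())
--
--     # Coincidencias exactas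
--     coincidencias = palabras_direccion.intersection(palabras_sugerencia)
--     puntaje += len(coincidencias) * 10  # 10 puntos por cada palabra que coincide
--
--     # Bonus por coincidencia de números
--     numeros_direccion = set(word for word in palabras_direccion if any(c.isdigit() for c in word))
--     numeros_sugerencia = set(word for word in palabras_sugerencia if any(c.isdigit() for c in word))
--     puntaje += len(numeros_direccion.intersection(numeros_sugerencia)) * 15  # 15 puntos extra por números
--
--     # Penalización por palabras muy diferentes
--     diferencia = len(palabras_sugerencia) - len(coincidencias)
--     puntaje -= diferencia * 5  # -5 puntos por cada palabra extra/faltante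
--
--     return puntaje
-- ===== SOURCE B (Python) =====
-- def evaluar_sugerencia(direccion_busqueda, texto_sugerencia):
--     """
--     Evalua la relevancia por ordenamiento y barrido: ordena las palabras
--     distintas de ambos lados y cuenta coincidencias con dos punteros
--     (merge de listas ordenadas) en lugar de intersecciones de conjuntos.
--     """
--     dir_words = sorted(set(direccion_busqueda.lower().replace('#', ' ').replace('-', ' ').split()))
--     sug_words = sorted(set(texto_sugerencia.lower().split()))
--     i = j = coincidencias = bonus = 0
--     while i < len(dir_words) and j < len(sug_words):
--         if dir_words[i] < sug_words[j]:
--             i += 1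
--         elif sug_words[j] < dir_words[i]:
--             j += 1
--         else:
--             coincidencias += 1
--             if any(c.isdigit() for c in sug_words[j]):
--                 bonus += 1
--             i += 1
--             j += 1
--     return coincidencias * 10 + bonus * 15 - (len(sug_words) - coincidencias) * 5
-- ===== Notes on version B (the rewrite author's own statement) =====
-- stated objective: alternative
-- what changed: Replaces A's hash-set intersections (matches and digit-word bonus) with a sort-then-merge: both distinct word lists are sorted and a single two-pointer scan counts matches and digit matches.
import Mathlib
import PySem

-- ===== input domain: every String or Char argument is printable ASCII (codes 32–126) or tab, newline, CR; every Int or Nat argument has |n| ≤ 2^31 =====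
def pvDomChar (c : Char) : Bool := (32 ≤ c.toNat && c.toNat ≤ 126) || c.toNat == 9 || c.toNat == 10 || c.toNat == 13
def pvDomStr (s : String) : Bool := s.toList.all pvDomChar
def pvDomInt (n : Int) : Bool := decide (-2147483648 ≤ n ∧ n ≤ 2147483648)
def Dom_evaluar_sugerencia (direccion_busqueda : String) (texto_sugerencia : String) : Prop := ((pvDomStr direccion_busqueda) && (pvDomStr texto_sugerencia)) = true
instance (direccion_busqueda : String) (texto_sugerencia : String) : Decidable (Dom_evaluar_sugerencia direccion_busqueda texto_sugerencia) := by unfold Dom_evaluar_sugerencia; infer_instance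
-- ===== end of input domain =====

-- B replaces A's hash-set intersections by sort-then-merge: both distinct word lists are
-- sorted and one two-pointer scan counts matches and digit matches (alternative algorithm).

-- ===== PORT A =====
def evaluar_sugerencia (direccion_busqueda : String) (texto_sugerencia : String) : Int :=
  let puntaje : Int := 0
  let direccion := PySem.Str.replace (PySem.Str.replace (PySem.Str.lower direccion_busqueda) "#" " ") "-" " "
  let sugerencia := PySem.Str.lower texto_sugerencia
  let palabras_direccion : PySem.Set String := PySem.Set.ofList (PySem.Str.split₀ direccion)
  let palabras_sugerencia : PySem.Set String := PySem.Set.ofList (PySem.Str.split₀ sugerencia)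
  let coincidencias : PySem.Set String := PySem.Set.inter palabras_direccion palabras_sugerencia
  let puntaje := puntaje + (PySem.Set.len coincidencias) * 10
  let numeros_direccion : PySem.Set String :=
    PySem.Set.ofList (palabras_direccion.filter (fun w => w.toList.any PySem.Chars.isdigit))
  let numeros_sugerencia : PySem.Set String :=
    PySem.Set.ofList (palabras_sugerencia.filter (fun w => w.toList.any PySem.Chars.isdigit))
  let puntaje := puntaje + (PySem.Set.len (PySem.Set.inter numeros_direccion numeros_sugerencia)) * 15
  let diferencia := PySem.Set.len palabras_sugerencia - PySem.Set.len coincidencias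
  let puntaje := puntaje - diferencia * 5
  puntaje

-- ===== PORT B =====
-- B's while loop over the two sorted lists with indices i, j = the obvious head-consuming
-- recursion on the two lists (advancing a pointer = dropping a head).
def pvMergeCount : List String → List String → Int × Int
  | [], _ => (0, 0)
  | _ :: _, [] => (0, 0)
  | x :: xs, y :: ys =>
    if x < y then pvMergeCount xs (y :: ys)
    else if y < x then pvMergeCount (x :: xs) ys
    else
      let r := pvMergeCount xs ys
      (r.1 + 1, r.2 + (if y.toList.any PySem.Chars.isdigit then 1 else 0))
termination_by xs ys => xs.length + ys.length
decreasing_by all_goals simp only [List.length_cons]; omega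

def evaluar_sugerencia_alt (direccion_busqueda : String) (texto_sugerencia : String) : Int :=
  let dir_words := PySem.List.sorted
    (PySem.Set.ofList (PySem.Str.split₀ (PySem.Str.replace (PySem.Str.replace (PySem.Str.lower direccion_busqueda) "#" " ") "-" " ")))
    (fun x => x) false
  let sug_words := PySem.List.sorted
    (PySem.Set.ofList (PySem.Str.split₀ (PySem.Str.lower texto_sugerencia))) (fun x => x) false
  let r := pvMergeCount dir_words sug_words
  r.1 * 10 + r.2 * 15 - (PySem.List.len sug_words - r.1) * 5

-- ===== PRECONDITION & SPEC =====
def Spec_evaluar_sugerencia (direccion_busqueda : String) (texto_sugerencia : String) (out : Int) : Prop := out = evaluar_sugerencia_alt direccion_busqueda texto_sugerencia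
instance (direccion_busqueda : String) (texto_sugerencia : String) (out : Int) : Decidable (Spec_evaluar_sugerencia direccion_busqueda texto_sugerencia out) := by unfold Spec_evaluar_sugerencia; infer_instance

-- ===== CLAIM (what is proved, stated in full; the proofs are below) =====
def Claim_equal_evaluar_sugerencia : Prop := ∀ (direccion_busqueda : String) (texto_sugerencia : String), Dom_evaluar_sugerencia direccion_busqueda texto_sugerencia → Spec_evaluar_sugerencia direccion_busqueda texto_sugerencia (evaluar_sugerencia direccion_busqueda texto_sugerencia)

-- ===== LEMMAS AND PROOFS =====

-- the digit test used by both programs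
def pvDig (w : String) : Bool := w.toList.any PySem.Chars.isdigit

-- two nodup lists with the same members have the same length
lemma pv_len_eq_of_mem_iff (l₁ l₂ : List String) (h₁ : l₁.Nodup) (h₂ : l₂.Nodup)
    (h : ∀ x, x ∈ l₁ ↔ x ∈ l₂) : l₁.length = l₂.length :=
  ((List.perm_ext_iff_of_nodup h₁ h₂).mpr h).length_eq

-- |pd ∩ ps| = number of suggestion words that occur in the address words
lemma pv_inter_len (pd ps : List String) (hpd : pd.Nodup) (hps : ps.Nodup) :
    (PySem.Set.inter pd ps).length = (ps.filter (fun w => decide (w ∈ pd))).length := by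
  apply pv_len_eq_of_mem_iff
  · exact PySem.Set.nodup_inter pd ps hpd
  · exact hps.filter _
  · intro x
    simp [PySem.Set.mem_inter]
    tauto

-- |digit-words(pd) ∩ digit-words(ps)| = number of matched suggestion words containing a digit
lemma pv_dig_inter_len (pd ps : List String) (_ : pd.Nodup) (hps : ps.Nodup) :
    (PySem.Set.inter (PySem.Set.ofList (pd.filter pvDig)) (PySem.Set.ofList (ps.filter pvDig))).length
      = (ps.filter (fun w => decide (w ∈ pd) && pvDig w)).length := by
  apply pv_len_eq_of_mem_iff
  · exact PySem.Set.nodup_inter _ _ (PySem.Set.nodup_ofList _)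
  · exact hps.filter _
  · intro x
    simp [PySem.Set.mem_inter, PySem.Set.mem_ofList, List.mem_filter]
    tauto


-- filters agree when the membership predicate agrees on the elements
lemma pv_filter_congr (xs xs' ys : List String)
    (h : ∀ w ∈ ys, (w ∈ xs ↔ w ∈ xs')) (p : String → Bool) :
    (ys.filter (fun w => decide (w ∈ xs) && p w)).length
      = (ys.filter (fun w => decide (w ∈ xs') && p w)).length := by
  induction ys with
  | nil => rfl
  | cons y ys ih =>
    have hy := h y (by simp)
    have hrest : ∀ w ∈ ys, (w ∈ xs ↔ w ∈ xs') := fun w hw => h w (by simp [hw])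
    simp only [List.filter_cons]
    by_cases hm : y ∈ xs
    · simp [hm, hy.mp hm]
      split <;> simp [ih hrest]
    · have : y ∉ xs' := fun hc => hm (hy.mpr hc)
      simp [hm, this, ih hrest]

-- the merge scan over two strictly increasing lists counts the common words and
-- the common words containing a digit
lemma pv_merge_spec : ∀ (xs ys : List String),
    xs.Pairwise (· < ·) → ys.Pairwise (· < ·) →
    pvMergeCount xs ys
      = (((ys.filter (fun w => decide (w ∈ xs) && true)).length : Int),
         ((ys.filter (fun w => decide (w ∈ xs) && pvDig w)).length : Int)) := by
  intro xs ys
  induction xs, ys using pvMergeCount.induct with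
  | case1 ys =>
    intro _ _
    simp [pvMergeCount]
  | case2 x xs =>
    intro _ _
    simp [pvMergeCount]
  | case3 x xs y ys hlt ih =>
    intro hxs hys
    have hxxs : ∀ e ∈ xs, x < e := fun e he => List.rel_of_pairwise_cons hxs he
    have hyys : ∀ e ∈ ys, y < e := fun e he => List.rel_of_pairwise_cons hys he
    have hmem : ∀ w ∈ y :: ys, (w ∈ xs ↔ w ∈ x :: xs) := by
      intro w hw
      have hxw : x < w := by
        rcases List.mem_cons.mp hw with h | h
        · exact h ▸ hlt
        · exact lt_trans hlt (hyys w h)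
      constructor
      · intro h; exact List.mem_cons_of_mem x h
      · intro h
        rcases List.mem_cons.mp h with h | h
        · exact absurd h (by intro he; exact absurd (he ▸ hxw) (lt_irrefl w))
        · exact h
    rw [pvMergeCount, if_pos hlt, ih hxs.tail hys,
        pv_filter_congr xs (x :: xs) (y :: ys) hmem,
        pv_filter_congr xs (x :: xs) (y :: ys) hmem]
  | case4 x xs y ys hnlt hlt ih =>
    intro hxs hys
    have hxxs : ∀ e ∈ xs, x < e := fun e he => List.rel_of_pairwise_cons hxs he
    have hy_not : y ∉ x :: xs := by
      intro hc
      rcases List.mem_cons.mp hc with h | h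
      · exact absurd (h ▸ hlt) (lt_irrefl y)
      · exact absurd (lt_trans hlt (hxxs y h)) (lt_irrefl y)
    rw [pvMergeCount, if_neg hnlt, if_pos hlt, ih hxs hys.tail]
    have h1 : (decide (y ∈ x :: xs) && true) = false := by simp [hy_not]
    have h2 : (decide (y ∈ x :: xs) && pvDig y) = false := by simp [hy_not]
    simp only [List.filter_cons, h1, h2, Bool.false_eq_true, if_false]
  | case5 x xs y ys hnlt hnlt' ih =>
    intro hxs hys
    have hxy : x = y := le_antisymm (not_lt.mp hnlt') (not_lt.mp hnlt)
    have hyys : ∀ e ∈ ys, y < e := fun e he => List.rel_of_pairwise_cons hys he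
    have hmem : ∀ w ∈ ys, (w ∈ xs ↔ w ∈ x :: xs) := by
      intro w hw
      have hxw : x < w := hxy ▸ hyys w hw
      constructor
      · intro h; exact List.mem_cons_of_mem x h
      · intro h
        rcases List.mem_cons.mp h with h | h
        · exact absurd h (by intro he; exact absurd (he ▸ hxw) (lt_irrefl w))
        · exact h
    have hy_mem : y ∈ x :: xs := by simp [hxy]
    rw [pvMergeCount, if_neg hnlt, if_neg hnlt', ih hxs.tail hys.tail,
        pv_filter_congr xs (x :: xs) ys hmem, pv_filter_congr xs (x :: xs) ys hmem]
    simp only [List.filter_cons, hy_mem, decide_true, Bool.true_and, Bool.and_true, pvDig]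
    by_cases hd : y.toList.any PySem.Chars.isdigit = true
    · simp [hd]
    · simp [hd]

-- ===== VERDICT (by name: the statement is the Claim_ definition above) =====
theorem evaluar_sugerencia_spec : Claim_equal_evaluar_sugerencia := by
  intro d t _
  unfold Spec_evaluar_sugerencia evaluar_sugerencia evaluar_sugerencia_alt
  simp only [PySem.List.len_eq, PySem.Set.len]
  set pd : PySem.Set String := PySem.Set.ofList (PySem.Str.split₀ (PySem.Str.replace (PySem.Str.replace (PySem.Str.lower d) "#" " ") "-" " ")) with hpd0
  set ps := PySem.Set.ofList (PySem.Str.split₀ (PySem.Str.lower t)) with hps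
  have hnd : pd.Nodup := PySem.Set.nodup_ofList _
  have hns : ps.Nodup := PySem.Set.nodup_ofList _
  have hsd : (PySem.List.sorted pd (fun x => x) false).Pairwise (· < ·) := by
    rw [hpd0]; exact PySem.List.sorted_ofList_pairwise_lt _
  have hss : (PySem.List.sorted ps (fun x => x) false).Pairwise (· < ·) := by
    rw [hps]; exact PySem.List.sorted_ofList_pairwise_lt _
  rw [pv_merge_spec _ _ hsd hss]
  have hperm : (PySem.List.sorted ps (fun x => x) false).Perm ps := PySem.List.sorted_perm _ _ _
  have hmemd : ∀ w ∈ PySem.List.sorted ps (fun x => x) false,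
      (w ∈ PySem.List.sorted pd (fun x => x) false ↔ w ∈ pd) := by
    intro w _; exact PySem.List.mem_sorted pd (fun x => x) false w
  have e1 : ((PySem.List.sorted ps (fun x => x) false).filter
        (fun w => decide (w ∈ PySem.List.sorted pd (fun x => x) false) && true)).length
      = (ps.filter (fun w => decide (w ∈ pd))).length := by
    rw [pv_filter_congr _ pd _ hmemd]
    simpa using (hperm.filter (fun w => decide (w ∈ pd))).length_eq
  have e2 : ((PySem.List.sorted ps (fun x => x) false).filter
        (fun w => decide (w ∈ PySem.List.sorted pd (fun x => x) false) && pvDig w)).length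
      = (ps.filter (fun w => decide (w ∈ pd) && pvDig w)).length := by
    rw [pv_filter_congr _ pd _ hmemd]
    exact (hperm.filter (fun w => decide (w ∈ pd) && pvDig w)).length_eq
  have h1 := pv_inter_len pd ps hnd hns
  have h2 : (PySem.Set.inter (PySem.Set.ofList (pd.filter (fun w => w.toList.any PySem.Chars.isdigit)))
      (PySem.Set.ofList (ps.filter (fun w => w.toList.any PySem.Chars.isdigit)))).length
      = (ps.filter (fun w => decide (w ∈ pd) && pvDig w)).length :=
    pv_dig_inter_len pd ps hnd hns
  rw [e1, e2, h1, h2, (PySem.List.length_sorted (xs := ps) (key := fun x => x) (rev := false) : _)]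
  ring
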